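-- pv_equiv track=rewrite | github.com/wyk18703232953/myResearch | codeComplex/data/filteredData/python/logn/python_logn_0055.py | Maxxor
-- ===== SOURCE A (Python) =====
-- import math
--
-- def Maxxor(l, r):
--     if l == r:
--         return 0
--     else:
--         reflog = math.floor(math.log2(r))
--         ref = 2 ** reflog
--         if l < ref:
--             return (2 * ref) - 1
--         else:
--             return Maxxor(l - ref, r - ref)
-- ===== SOURCE B (Python) =====
-- def Maxxor(l, r):
--     # closed form: all bits up to the highest bit where l and r differ
--     return (1 << (l ^ r).bit_length()) - 1
-- ===== Notes on version B (the rewrite author's own statement) =====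
-- stated objective: simpler
-- what changed: Replaces the bit-peeling recursion (floor(log2 r) per step, subtract the top power of two from both ends) with a one-line closed form: (1 << (l ^ r).bit_length()) - 1.
-- outside the precondition, e.g. on Maxxor(-2, 2): A returns 3, B returns 7
import Mathlib
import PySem

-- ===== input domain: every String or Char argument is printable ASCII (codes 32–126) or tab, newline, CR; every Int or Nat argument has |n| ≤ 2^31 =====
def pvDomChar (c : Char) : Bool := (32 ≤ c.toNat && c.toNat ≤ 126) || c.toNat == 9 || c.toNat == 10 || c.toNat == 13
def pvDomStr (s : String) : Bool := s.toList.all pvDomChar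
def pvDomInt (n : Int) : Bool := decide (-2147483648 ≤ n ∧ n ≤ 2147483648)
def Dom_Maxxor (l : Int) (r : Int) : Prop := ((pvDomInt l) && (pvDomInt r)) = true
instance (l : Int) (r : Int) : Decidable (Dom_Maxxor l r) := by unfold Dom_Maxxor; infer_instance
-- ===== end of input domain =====

-- B replaces A's bit-peeling recursion with the closed form (1 << (l ^ r).bit_length()) - 1 (simpler).
-- Equivalence is claimed on the task's natural domain 0 ≤ l ≤ r (plus the degenerate l = r); see Pre_Maxxor.

-- ===== PORT A =====
-- math.floor(math.log2 r) is exact for the integers of Dom (0 < r ≤ 2^31), hence Nat.log2.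
def Maxxor (l : Int) (r : Int) : Int :=
  if l = r then 0
  else if _hr : r ≤ 0 then 0  -- Python: math.log2 raises ValueError here; excluded by Pre_Maxxor
  else
    let reflog : Nat := Nat.log2 r.toNat
    let ref : Int := 2 ^ reflog
    if l < ref then 2 * ref - 1
    else Maxxor (l - ref) (r - ref)
termination_by r.toNat
decreasing_by
  have hp : (0:Int) < 2 ^ Nat.log2 r.toNat := pow_pos (by norm_num) _
  omega

-- ===== PORT B =====
def Maxxor_alt (l : Int) (r : Int) : Int :=
  ((1 : Int) <<< PySem.Int.bitLength (PySem.Int.bxor l r)) - 1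

-- ===== PRECONDITION & SPEC =====
-- Pre_ restricts to the natural domain of the max-XOR-in-range task: 0 ≤ l ≤ r (the degenerate
-- l = r, where A returns 0, is kept for any sign).  It excludes (a) inputs where A raises
-- (l ≠ r with r ≤ 0: math.log2 ValueError; l > r: the recursion drives r to 0 and raises there)
-- and (b) negative l with l < r, outside the task's natural nonnegative range.
def Pre_Maxxor (l : Int) (r : Int) : Prop := l = r ∨ (0 ≤ l ∧ l ≤ r)
instance (l : Int) (r : Int) : Decidable (Pre_Maxxor l r) := by unfold Pre_Maxxor; infer_instance
def pvWitness_Maxxor : Int × Int := (3, 10)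
def Spec_Maxxor (l : Int) (r : Int) (out : Int) : Prop := out = Maxxor_alt l r
instance (l : Int) (r : Int) (out : Int) : Decidable (Spec_Maxxor l r out) := by unfold Spec_Maxxor; infer_instance

-- ===== CLAIM (what is proved, stated in full; the proofs are below) =====
def Claim_equal_Maxxor : Prop := ∀ (l : Int) (r : Int), Dom_Maxxor l r → Pre_Maxxor l r → Spec_Maxxor l r (Maxxor l r)

-- ===== LEMMAS AND PROOFS =====

-- Python's bit_length of a value in [2^k, 2^(k+1)) is k+1.
theorem pv_bitLength_eq (m k : Nat) (h1 : 2^k ≤ m) (h2 : m < 2^(k+1)) :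
    PySem.Int.bitLength (m : Int) = k + 1 := by
  have hm : m ≠ 0 := by have := Nat.two_pow_pos k; omega
  have h3 := PySem.Int.two_pow_bitLength_le (m : Int) (by exact_mod_cast hm)
  have h4 := PySem.Int.lt_two_pow_bitLength (m : Int)
  rw [Int.natAbs_natCast] at h3 h4
  have hk : k < PySem.Int.bitLength (m : Int) :=
    (Nat.pow_lt_pow_iff_right (by norm_num)).mp (lt_of_le_of_lt h1 h4)
  have hk2 : PySem.Int.bitLength (m : Int) - 1 < k + 1 :=
    (Nat.pow_lt_pow_iff_right (by norm_num)).mp (lt_of_le_of_lt h3 h2)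
  omega

-- adding 2^k to m < 2^k is xor with 2^k
theorem pv_two_pow_add_eq_xor (k m : Nat) (h : m < 2^k) : 2^k + m = 2^k ^^^ m := by
  have h1 : 2^k + m = 2^k ||| m := by simpa using Nat.two_pow_add_eq_or_of_lt h 1
  have h2 : 2^k ||| m = 2^k ^^^ m := by
    apply Nat.eq_of_testBit_eq
    intro i
    by_cases hik : i = k
    · subst hik
      simp [Nat.testBit_or, Nat.testBit_xor, Nat.testBit_two_pow_self,
        Nat.testBit_eq_false_of_lt h]
    · simp [Nat.testBit_or, Nat.testBit_xor, Nat.testBit_two_pow_of_ne (Ne.symm hik)]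
  rw [h1, h2]

-- peeling the common top bit preserves the xor
theorem pv_xor_peel (k a b : Nat) (ha1 : 2^k ≤ a) (ha2 : a < 2^(k+1))
    (hb1 : 2^k ≤ b) (hb2 : b < 2^(k+1)) :
    (a - 2^k) ^^^ (b - 2^k) = a ^^^ b := by
  have hpow : (2:Nat)^(k+1) = 2^k + 2^k := by ring
  obtain ⟨a', rfl⟩ : ∃ a', a = 2^k + a' := ⟨a - 2^k, by omega⟩
  obtain ⟨b', rfl⟩ : ∃ b', b = 2^k + b' := ⟨b - 2^k, by omega⟩
  have ha' : a' < 2^k := by omega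
  have hb' : b' < 2^k := by omega
  have hcancel : ∀ x u v : Nat, (x ^^^ u) ^^^ (x ^^^ v) = u ^^^ v := by
    intro x u v
    rw [Nat.xor_comm x u, Nat.xor_assoc, ← Nat.xor_assoc x x v, Nat.xor_self, Nat.zero_xor]
  rw [show 2^k + a' - 2^k = a' by omega, show 2^k + b' - 2^k = b' by omega,
    pv_two_pow_add_eq_xor k a' ha', pv_two_pow_add_eq_xor k b' hb']
  exact (hcancel _ _ _).symm

-- main induction: A = B on 0 ≤ l < r
theorem pv_main : ∀ (n : Nat) (l r : Int), r.toNat = n → 0 ≤ l → l < r →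
    Maxxor l r = Maxxor_alt l r := by
  intro n
  induction n using Nat.strong_induction_on with
  | _ n ih =>
    intro l r hn hl hlr
    have hr : (0:Int) < r := lt_of_le_of_lt hl hlr
    have hlcast : l = (l.toNat : Int) := (Int.toNat_of_nonneg hl).symm
    have hrcast : r = (r.toNat : Int) := (Int.toNat_of_nonneg hr.le).symm
    have hb1 : 2^(Nat.log2 r.toNat) ≤ r.toNat := Nat.log2_self_le (by omega)
    have hb2 : r.toNat < 2^(Nat.log2 r.toNat + 1) := Nat.lt_log2_self
    have hposk : (0:Int) < 2 ^ Nat.log2 r.toNat := pow_pos (by norm_num) _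
    have hcast2 : ((2:Int) ^ Nat.log2 r.toNat) = ((2 ^ Nat.log2 r.toNat : Nat) : Int) := by
      push_cast; ring
    rw [Maxxor.eq_def]
    rw [if_neg (by omega : ¬ l = r), dif_neg (by omega : ¬ r ≤ 0)]
    by_cases hcase : l < (2:Int) ^ Nat.log2 r.toNat
    · rw [if_pos hcase]
      have ha : l.toNat < 2 ^ Nat.log2 r.toNat := by
        rw [hlcast, hcast2] at hcase; exact_mod_cast hcase
      have hx1 : 2 ^ Nat.log2 r.toNat ≤ l.toNat ^^^ r.toNat := by
        apply Nat.ge_two_pow_of_testBit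
        simp [Nat.testBit_xor, Nat.testBit_eq_false_of_lt ha,
          Nat.testBit_of_two_pow_le_and_two_pow_add_one_gt hb1 hb2]
      have hx2 : l.toNat ^^^ r.toNat < 2 ^ (Nat.log2 r.toNat + 1) :=
        Nat.xor_lt_two_pow (lt_trans ha (by
          have := Nat.two_pow_pos (Nat.log2 r.toNat); omega)) hb2
      unfold Maxxor_alt
      rw [hlcast, hrcast, PySem.Int.bxor_natCast, pv_bitLength_eq _ _ hx1 hx2]
      rw [Int.shiftLeft_eq]
      simp only [Int.toNat_natCast]
      ring
    · rw [if_neg hcase]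
      have hrefle : (2:Int) ^ Nat.log2 r.toNat ≤ l := not_lt.mp hcase
      have hrec := ih (r - 2 ^ Nat.log2 r.toNat).toNat (by omega)
        (l - 2 ^ Nat.log2 r.toNat) (r - 2 ^ Nat.log2 r.toNat) rfl (by omega) (by omega)
      rw [hrec]
      -- the subtracted arguments have the same xor, hence the same closed form
      have ha1 : 2 ^ Nat.log2 r.toNat ≤ l.toNat := by
        rw [hlcast, hcast2] at hrefle; exact_mod_cast hrefle
      have ha2 : l.toNat < 2 ^ (Nat.log2 r.toNat + 1) := by
        have hlr' : l.toNat < r.toNat := by omega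
        omega
      have hsl : l - 2 ^ Nat.log2 r.toNat = ((l.toNat - 2 ^ Nat.log2 r.toNat : Nat) : Int) := by
        rw [hcast2] at *; push_cast [Nat.cast_sub ha1]; omega
      have hsr : r - 2 ^ Nat.log2 r.toNat = ((r.toNat - 2 ^ Nat.log2 r.toNat : Nat) : Int) := by
        rw [hcast2] at *; push_cast [Nat.cast_sub hb1]; omega
      unfold Maxxor_alt
      rw [hsl, hsr, PySem.Int.bxor_natCast,
        pv_xor_peel _ _ _ ha1 ha2 hb1 hb2]
      rw [hlcast, hrcast, PySem.Int.bxor_natCast]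
      simp only [Int.toNat_natCast]

theorem pv_spec (l r : Int) (h : Pre_Maxxor l r) : Maxxor l r = Maxxor_alt l r := by
  rcases h with h | ⟨h0, hle⟩
  · subst h
    rw [Maxxor.eq_def]
    simp [Maxxor_alt, Int.shiftLeft_eq]
  · rcases eq_or_lt_of_le hle with h | h
    · subst h
      rw [Maxxor.eq_def]
      simp [Maxxor_alt, Int.shiftLeft_eq]
    · exact pv_main r.toNat l r rfl h0 h

-- ===== VERDICT (by name: the statement is the Claim_ definition above) =====
theorem Maxxor_spec : Claim_equal_Maxxor := by
  intro l r _ hpre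
  exact pv_spec l r hpre
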